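-- pv_equiv track=rewrite | github.com/dayonoliveira/Statistic | statistic/statistic.py | Fad
-- ===== SOURCE A (Python) =====
-- def Fad(fi:list):
--     aux:list = []
--
--     for x in reversed(range(len(fi))):
--         if x == len(fi) - 1:
--             aux.append(fi[x])
--         else:
--             aux.insert(0, aux[0] + fi[x])
--
--     return aux
-- ===== SOURCE B (Python) =====
-- def Fad(fi: list):
--     # Total-minus-prefix: suffix sum at i equals sum(fi) minus the sum of the
--     # elements before i.  Compute the total once, then one FORWARD pass that
--     # emits the current remaining total and subtracts the element just passed.
--     # O(n), builds the output front-to-back, no reversal and no insert(0,...).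
--     t = sum(fi)
--     out = []
--     for v in fi:
--         out.append(t)
--         t -= v
--     return out
-- ===== Notes on version B (the rewrite author's own statement) =====
-- stated objective: faster
-- what changed: Replaces the backward index loop with repeated list.insert(0, ...) by computing the total sum once and then a single forward pass that emits the remaining total and subtracts each element, building the output front-to-back.
import Mathlib
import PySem

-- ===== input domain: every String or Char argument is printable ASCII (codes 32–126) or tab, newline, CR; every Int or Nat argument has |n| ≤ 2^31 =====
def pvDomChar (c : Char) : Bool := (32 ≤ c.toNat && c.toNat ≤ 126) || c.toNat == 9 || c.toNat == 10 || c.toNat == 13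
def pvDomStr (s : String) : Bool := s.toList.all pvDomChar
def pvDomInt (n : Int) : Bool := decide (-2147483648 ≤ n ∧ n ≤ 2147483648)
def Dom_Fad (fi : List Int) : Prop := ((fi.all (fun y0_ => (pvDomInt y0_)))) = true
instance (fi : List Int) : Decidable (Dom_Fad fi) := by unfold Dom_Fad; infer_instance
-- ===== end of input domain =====

-- B computes the total sum once and does one forward pass emitting the remaining
-- total and subtracting each element, instead of A's quadratic backward loop with
-- insert-at-front (objective: faster).


-- ===== PORT A =====
-- reversed(range(len(fi))) is (pyRange 0 n 1).reverse; all fi[x] / aux[0] accesses are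
-- in range on every input, so pyGetD's default 0 is never used.
def Fad (fi : List Int) : List Int :=
  ((PySem.List.pyRange 0 (fi.length : Int) 1).reverse).foldl
    (fun aux x =>
      if x = (fi.length : Int) - 1 then
        aux ++ [PySem.List.pyGetD fi x 0]
      else
        (PySem.List.pyGetD aux 0 0 + PySem.List.pyGetD fi x 0) :: aux)
    []

-- ===== PORT B =====
-- t = sum(fi); forward fold carrying (out, t): append t, then subtract v.
def Fad_alt (fi : List Int) : List Int :=
  (fi.foldl (fun (p : List Int × Int) v => (p.1 ++ [p.2], p.2 - v)) ([], fi.sum)).1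

-- ===== PRECONDITION & SPEC =====
def Spec_Fad (fi : List Int) (out : List Int) : Prop := out = Fad_alt fi
instance (fi : List Int) (out : List Int) : Decidable (Spec_Fad fi out) := by unfold Spec_Fad; infer_instance

-- ===== CLAIM (what is proved, stated in full; the proofs are below) =====
def Claim_equal_Fad : Prop := ∀ (fi : List Int), Dom_Fad fi → Spec_Fad fi (Fad fi)

-- ===== LEMMAS AND PROOFS =====

-- suffix-sums reference function
def sfx : List Int → List Int
  | [] => []
  | a :: l => (a + (sfx l).headD 0) :: sfx l

theorem sfx_headD (l : List Int) : (sfx l).headD 0 = l.sum := by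
  induction l with
  | nil => simp [sfx]
  | cons a t ih => simp only [sfx, List.headD_cons, List.sum_cons, ih]

-- A-side invariant: folding indices k-1,…,0 onto the suffix sums of fi.drop k yields sfx fi
theorem fad_inv (fi : List Int) (k : Nat) (hk : k ≤ fi.length) :
    ((PySem.List.pyRange 0 (k : Int) 1).reverse).foldl
      (fun aux x =>
        if x = (fi.length : Int) - 1 then
          aux ++ [PySem.List.pyGetD fi x 0]
        else
          (PySem.List.pyGetD aux 0 0 + PySem.List.pyGetD fi x 0) :: aux)
      (sfx (fi.drop k)) = sfx fi := by
  induction k with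
  | zero => simp
  | succ k ih =>
    have hk' : k ≤ fi.length := Nat.le_of_succ_le hk
    have hklt : k < fi.length := hk
    have hsucc : ((k : Int) + 1) = ((k + 1 : Nat) : Int) := by push_cast; ring
    have hsplit : PySem.List.pyRange 0 ((k + 1 : Nat) : Int) 1
        = PySem.List.pyRange 0 (k : Int) 1 ++ [(k : Int)] := by
      rw [← hsucc]; exact PySem.List.pyRange_one_succ_right (by omega)
    rw [hsplit, List.reverse_append]
    simp only [List.reverse_cons, List.reverse_nil, List.nil_append, List.singleton_append,
      List.foldl_cons]
    have hdrop : fi.drop k = fi[k] :: fi.drop (k + 1) := List.drop_eq_getElem_cons hklt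
    have hget : PySem.List.pyGetD fi ((k : Nat) : Int) 0 = fi[k] := by
      rw [PySem.List.pyGetD_natCast]; exact List.getD_eq_getElem fi 0 hklt
    have hX : (if ((k : Nat) : Int) = (fi.length : Int) - 1 then
          sfx (fi.drop (k + 1)) ++ [PySem.List.pyGetD fi ((k : Nat) : Int) 0]
        else
          (PySem.List.pyGetD (sfx (fi.drop (k + 1))) 0 0 + PySem.List.pyGetD fi ((k : Nat) : Int) 0)
            :: sfx (fi.drop (k + 1))) = sfx (fi.drop k) := by
      by_cases hlast : k + 1 = fi.length
      · rw [if_pos (by omega : ((k : Nat) : Int) = (fi.length : Int) - 1)]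
        have hnil : fi.drop (k + 1) = [] := by rw [hlast]; simp
        rw [hdrop, hnil, hget]
        simp [sfx]
      · rw [if_neg (by omega : ¬ ((k : Nat) : Int) = (fi.length : Int) - 1)]
        have hhead : PySem.List.pyGetD (sfx (fi.drop (k + 1))) 0 0 = (fi.drop (k + 1)).sum := by
          rw [PySem.List.pyGetD_zero, ← sfx_headD]
          cases sfx (fi.drop (k + 1)) <;> simp
        rw [hhead, hget, hdrop]
        simp only [sfx, sfx_headD]
        rw [Int.add_comm]
    rw [hX]
    exact ih hk'

theorem fad_eq_sfx (fi : List Int) : Fad fi = sfx fi := by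
  have h := fad_inv fi fi.length le_rfl
  rw [List.drop_length] at h
  simpa [Fad, sfx] using h

-- B-side: the forward fold emits t, t - v₁, t - v₁ - v₂, …
def emit : List Int → Int → List Int
  | [], _ => []
  | v :: l, t => t :: emit l (t - v)

theorem foldB_eq (l : List Int) (aux : List Int) (t : Int) :
    l.foldl (fun (p : List Int × Int) v => (p.1 ++ [p.2], p.2 - v)) (aux, t)
      = (aux ++ emit l t, t - l.sum) := by
  induction l generalizing aux t with
  | nil => simp [emit]
  | cons v m ih => simp [emit, ih, List.append_assoc]; ring

theorem emit_sum_eq_sfx (l : List Int) : emit l l.sum = sfx l := by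
  induction l with
  | nil => rfl
  | cons a m ih =>
    simp only [emit, List.sum_cons, sfx, sfx_headD]
    rw [show a + m.sum - a = m.sum by ring, ih]

theorem fad_alt_eq_sfx (fi : List Int) : Fad_alt fi = sfx fi := by
  unfold Fad_alt
  rw [foldB_eq]
  simpa using emit_sum_eq_sfx fi

-- ===== VERDICT (by name: the statement is the Claim_ definition above) =====
theorem Fad_spec : Claim_equal_Fad := by
  intro fi _
  unfold Spec_Fad
  rw [fad_eq_sfx, fad_alt_eq_sfx]
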